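-- pv_equiv track=rewrite | github.com/faith441/openclawclone | skills/regex-helper/scripts/regex_test.py | explain_pattern
-- ===== SOURCE A (Python) =====
-- EXPLANATIONS = {
--     ".": "Any single character (except newline)",
--     "\\d": "Any digit (0-9)",
--     "\\D": "Any non-digit",
--     "\\w": "Any word character (a-z, A-Z, 0-9, _)",
--     "\\W": "Any non-word character",
--     "\\s": "Any whitespace (space, tab, newline)",
--     "\\S": "Any non-whitespace",
--     "^": "Start of string/line",
--     "$": "End of string/line",
--     "\\b": "Word boundary",
--     "*": "Zero or more of the preceding",
--     "+": "One or more of the preceding",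
--     "?": "Zero or one of the preceding (optional)",
--     "{n}": "Exactly n of the preceding",
--     "{n,}": "n or more of the preceding",
--     "{n,m}": "Between n and m of the preceding",
--     "[...]": "Character class - any one of the characters inside",
--     "[^...]": "Negated character class - any character NOT inside",
--     "(...)": "Capturing group - captures the matched text",
--     "(?:...)": "Non-capturing group - groups without capturing",
--     "(?=...)": "Positive lookahead - matches if followed by ...",
--     "(?!...)": "Negative lookahead - matches if NOT followed by ...",
--     "|": "Alternation - matches either side",
-- }
--
-- def explain_pattern(pattern):
--     """Explain a regex pattern in plain language."""
--     explanations = []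
--     i = 0
--
--     while i < len(pattern):
--         char = pattern[i]
--         explained = False
--
--         # Check for escaped characters
--         if char == "\\" and i + 1 < len(pattern):
--             escape_seq = pattern[i:i+2]
--             if escape_seq in EXPLANATIONS:
--                 explanations.append((escape_seq, EXPLANATIONS[escape_seq]))
--                 i += 2
--                 explained = True
--
--         # Check for character classes
--         if not explained and char == "[":
--             end = pattern.find("]", i)
--             if end != -1:
--                 char_class = pattern[i:end+1]
--                 if char_class.startswith("[^"):
--                     explanations.append((char_class, f"Any character NOT in: {char_class[2:-1]}"))
--                 else:
--                     explanations.append((char_class, f"Any character in: {char_class[1:-1]}"))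
--                 i = end + 1
--                 explained = True
--
--         # Check for groups
--         if not explained and char == "(":
--             depth = 1
--             end = i + 1
--             while end < len(pattern) and depth > 0:
--                 if pattern[end] == "(":
--                     depth += 1
--                 elif pattern[end] == ")":
--                     depth -= 1
--                 end += 1
--
--             group = pattern[i:end]
--             if group.startswith("(?:"):
--                 explanations.append((group, f"Non-capturing group: {group[3:-1]}"))
--             elif group.startswith("(?="):
--                 explanations.append((group, f"Lookahead (must be followed by): {group[3:-1]}"))
--             elif group.startswith("(?!"):
--                 explanations.append((group, f"Negative lookahead (must NOT be followed by): {group[3:-1]}"))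
--             else:
--                 explanations.append((group, f"Capturing group: {group[1:-1]}"))
--             i = end
--             explained = True
--
--         # Check for quantifiers
--         if not explained and char == "{":
--             end = pattern.find("}", i)
--             if end != -1:
--                 quant = pattern[i:end+1]
--                 explanations.append((quant, f"Repeat {quant[1:-1]} times"))
--                 i = end + 1
--                 explained = True
--
--         # Single character explanations
--         if not explained:
--             if char in EXPLANATIONS:
--                 explanations.append((char, EXPLANATIONS[char]))
--             elif char.isalnum():
--                 explanations.append((char, f"Literal character: {char}"))
--             else:
--                 explanations.append((char, f"Literal: {char}"))
--             i += 1
--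
--     return explanations
-- ===== SOURCE B (Python) =====
-- # B: consumes the pattern as a stack of characters (pop from the front), building each
-- # token by consumption (closer search / paren-depth walk on the remaining suffix), then
-- # explains each raw token from its own shape. Objective: alternative decomposition.
--
-- EXPLANATIONS = {
--     ".": "Any single character (except newline)",
--     "\\d": "Any digit (0-9)",
--     "\\D": "Any non-digit",
--     "\\w": "Any word character (a-z, A-Z, 0-9, _)",
--     "\\W": "Any non-word character",
--     "\\s": "Any whitespace (space, tab, newline)",
--     "\\S": "Any non-whitespace",
--     "^": "Start of string/line",
--     "$": "End of string/line",
--     "\\b": "Word boundary",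
--     "*": "Zero or more of the preceding",
--     "+": "One or more of the preceding",
--     "?": "Zero or one of the preceding (optional)",
--     "{n}": "Exactly n of the preceding",
--     "{n,}": "n or more of the preceding",
--     "{n,m}": "Between n and m of the preceding",
--     "[...]": "Character class - any one of the characters inside",
--     "[^...]": "Negated character class - any character NOT inside",
--     "(...)": "Capturing group - captures the matched text",
--     "(?:...)": "Non-capturing group - groups without capturing",
--     "(?=...)": "Positive lookahead - matches if followed by ...",
--     "(?!...)": "Negative lookahead - matches if NOT followed by ...",
--     "|": "Alternation - matches either side",
-- }
--
--
-- def _scan(pattern):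
--     """Cut the pattern into raw tokens by consuming a character stack."""
--     stack = list(pattern)
--     stack.reverse()          # stack[-1] is the next character of the pattern
--     tokens = []
--     while stack:
--         c = stack.pop()
--         if c == "\\" and stack and (c + stack[-1]) in EXPLANATIONS:
--             tokens.append(c + stack.pop())
--         elif c == "[" or c == "{":
--             close = "]" if c == "[" else "}"
--             buf = []
--             while stack:
--                 d = stack.pop()
--                 buf.append(d)
--                 if d == close:
--                     break
--             if buf and buf[-1] == close:
--                 tokens.append(c + "".join(buf))
--             else:                          # no closer anywhere: plain one-char token
--                 buf.reverse()
--                 stack.extend(buf)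
--                 tokens.append(c)
--         elif c == "(":
--             depth = 1
--             buf = []
--             while stack and depth:
--                 d = stack.pop()
--                 buf.append(d)
--                 if d == "(":
--                     depth += 1
--                 elif d == ")":
--                     depth -= 1
--             tokens.append(c + "".join(buf))
--         else:
--             tokens.append(c)
--     return tokens
--
--
-- def _explain(tok):
--     """Explain one raw token from its own shape."""
--     if len(tok) == 2 and tok[0] == "\\":
--         return EXPLANATIONS[tok]
--     if tok[:2] == "[^":
--         return f"Any character NOT in: {tok[2:-1]}"
--     if len(tok) >= 2 and tok[0] == "[":
--         return f"Any character in: {tok[1:-1]}"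
--     if tok[:3] == "(?:":
--         return f"Non-capturing group: {tok[3:-1]}"
--     if tok[:3] == "(?=":
--         return f"Lookahead (must be followed by): {tok[3:-1]}"
--     if tok[:3] == "(?!":
--         return f"Negative lookahead (must NOT be followed by): {tok[3:-1]}"
--     if tok[0] == "(":
--         return f"Capturing group: {tok[1:-1]}"
--     if len(tok) >= 2 and tok[0] == "{":
--         return f"Repeat {tok[1:-1]} times"
--     if tok in EXPLANATIONS:
--         return EXPLANATIONS[tok]
--     if tok.isalnum():
--         return f"Literal character: {tok}"
--     return f"Literal: {tok}"
--
--
-- def explain_pattern(pattern):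
--     """Explain a regex pattern in plain language."""
--     return [(tok, _explain(tok)) for tok in _scan(pattern)]
-- ===== Notes on version B (the rewrite author's own statement) =====
-- stated objective: alternative
-- what changed: A walks the pattern with an integer index, using pattern.find and index slicing to cut each token; B instead consumes the pattern as a stack of characters (popping from the front), building each token by consumption (closer search and paren-depth walk on the remaining suffix), then explains each raw token from its own shape in a separate pass.
import Mathlib
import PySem

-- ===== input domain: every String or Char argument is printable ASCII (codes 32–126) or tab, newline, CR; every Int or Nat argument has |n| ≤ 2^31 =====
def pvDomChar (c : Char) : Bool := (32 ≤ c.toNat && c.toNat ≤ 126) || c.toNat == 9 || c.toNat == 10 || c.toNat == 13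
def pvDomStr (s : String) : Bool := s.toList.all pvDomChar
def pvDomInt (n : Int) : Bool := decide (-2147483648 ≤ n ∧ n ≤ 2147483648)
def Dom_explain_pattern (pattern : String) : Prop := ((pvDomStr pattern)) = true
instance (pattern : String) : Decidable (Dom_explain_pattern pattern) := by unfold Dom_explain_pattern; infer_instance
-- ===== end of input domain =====

-- B consumes the pattern as a stack of characters (tokens built by popping from the
-- front, closer search / paren-depth walk done on the remaining suffix), then explains
-- each raw token from its own shape — instead of A's index arithmetic with find/slices.

-- The module-level EXPLANATIONS dict (shared constant of the module, used by both A and B).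
def pvEXPL : PySem.Dict String String := PySem.Dict.ofList [
  (".", "Any single character (except newline)"),
  ("\\d", "Any digit (0-9)"),
  ("\\D", "Any non-digit"),
  ("\\w", "Any word character (a-z, A-Z, 0-9, _)"),
  ("\\W", "Any non-word character"),
  ("\\s", "Any whitespace (space, tab, newline)"),
  ("\\S", "Any non-whitespace"),
  ("^", "Start of string/line"),
  ("$", "End of string/line"),
  ("\\b", "Word boundary"),
  ("*", "Zero or more of the preceding"),
  ("+", "One or more of the preceding"),
  ("?", "Zero or one of the preceding (optional)"),
  ("{n}", "Exactly n of the preceding"),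
  ("{n,}", "n or more of the preceding"),
  ("{n,m}", "Between n and m of the preceding"),
  ("[...]", "Character class - any one of the characters inside"),
  ("[^...]", "Negated character class - any character NOT inside"),
  ("(...)", "Capturing group - captures the matched text"),
  ("(?:...)", "Non-capturing group - groups without capturing"),
  ("(?=...)", "Positive lookahead - matches if followed by ..."),
  ("(?!...)", "Negative lookahead - matches if NOT followed by ..."),
  ("|", "Alternation - matches either side")]

-- ===== PORT A =====

-- the inner 'while end < len(pattern) and depth > 0' loop of A's group branch
def pvGroupEnd (cs : List Char) (depth e : Nat) : Nat :=
  if h : e < cs.length ∧ 0 < depth then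
    pvGroupEnd cs
      (if cs.getD e ' ' = '(' then depth + 1
       else if cs.getD e ' ' = ')' then depth - 1 else depth) (e + 1)
  else e
termination_by cs.length - e
decreasing_by omega

-- A's trailing single-character block (runs whenever no earlier branch explained)
def pvSingleA (char : Char) : String × String :=
  if pvEXPL.contains (String.ofList [char]) then
    (String.ofList [char], pvEXPL.getD (String.ofList [char]) "")
  else if PySem.Chars.strIsalnum [char] then
    (String.ofList [char], "Literal character: " ++ String.ofList [char])
  else
    (String.ofList [char], "Literal: " ++ String.ofList [char])

-- A's while loop, one step per token; fuel = number of remaining iterations (≤ cs.length)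
def pvExplainA (cs : List Char) : Nat → Nat → List (String × String)
  | 0, _ => []
  | fuel + 1, i =>
    if i < cs.length then
      if cs.getD i ' ' = '\\' ∧ i + 1 < cs.length then
        -- escaped characters
        if pvEXPL.contains (String.ofList (PySem.List.slice cs (some (i : Int)) (some ((i : Int) + 2)))) then
          (String.ofList (PySem.List.slice cs (some (i : Int)) (some ((i : Int) + 2))),
           pvEXPL.getD (String.ofList (PySem.List.slice cs (some (i : Int)) (some ((i : Int) + 2)))) "")
            :: pvExplainA cs fuel (i + 2)
        else pvSingleA (cs.getD i ' ') :: pvExplainA cs fuel (i + 1)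
      else if cs.getD i ' ' = '[' then
        -- character classes
        if PySem.Chars.findFrom cs [']'] (i : Int) ≠ -1 then
          (String.ofList (PySem.List.slice cs (some (i : Int)) (some (PySem.Chars.findFrom cs [']'] (i : Int) + 1))),
           if PySem.Chars.startswith (PySem.List.slice cs (some (i : Int)) (some (PySem.Chars.findFrom cs [']'] (i : Int) + 1))) ['[', '^'] then
             "Any character NOT in: " ++ String.ofList (PySem.List.slice (PySem.List.slice cs (some (i : Int)) (some (PySem.Chars.findFrom cs [']'] (i : Int) + 1))) (some 2) (some (-1)))
           else
             "Any character in: " ++ String.ofList (PySem.List.slice (PySem.List.slice cs (some (i : Int)) (some (PySem.Chars.findFrom cs [']'] (i : Int) + 1))) (some 1) (some (-1))))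
            :: pvExplainA cs fuel ((PySem.Chars.findFrom cs [']'] (i : Int)).toNat + 1)
        else pvSingleA (cs.getD i ' ') :: pvExplainA cs fuel (i + 1)
      else if cs.getD i ' ' = '(' then
        -- groups (always explained)
        (String.ofList (PySem.List.slice cs (some (i : Int)) (some (pvGroupEnd cs 1 (i + 1) : Int))),
         if PySem.Chars.startswith (PySem.List.slice cs (some (i : Int)) (some (pvGroupEnd cs 1 (i + 1) : Int))) ['(', '?', ':'] then
           "Non-capturing group: " ++ String.ofList (PySem.List.slice (PySem.List.slice cs (some (i : Int)) (some (pvGroupEnd cs 1 (i + 1) : Int))) (some 3) (some (-1)))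
         else if PySem.Chars.startswith (PySem.List.slice cs (some (i : Int)) (some (pvGroupEnd cs 1 (i + 1) : Int))) ['(', '?', '='] then
           "Lookahead (must be followed by): " ++ String.ofList (PySem.List.slice (PySem.List.slice cs (some (i : Int)) (some (pvGroupEnd cs 1 (i + 1) : Int))) (some 3) (some (-1)))
         else if PySem.Chars.startswith (PySem.List.slice cs (some (i : Int)) (some (pvGroupEnd cs 1 (i + 1) : Int))) ['(', '?', '!'] then
           "Negative lookahead (must NOT be followed by): " ++ String.ofList (PySem.List.slice (PySem.List.slice cs (some (i : Int)) (some (pvGroupEnd cs 1 (i + 1) : Int))) (some 3) (some (-1)))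
         else
           "Capturing group: " ++ String.ofList (PySem.List.slice (PySem.List.slice cs (some (i : Int)) (some (pvGroupEnd cs 1 (i + 1) : Int))) (some 1) (some (-1))))
          :: pvExplainA cs fuel (pvGroupEnd cs 1 (i + 1))
      else if cs.getD i ' ' = '{' then
        -- quantifiers
        if PySem.Chars.findFrom cs ['}'] (i : Int) ≠ -1 then
          (String.ofList (PySem.List.slice cs (some (i : Int)) (some (PySem.Chars.findFrom cs ['}'] (i : Int) + 1))),
           "Repeat " ++ String.ofList (PySem.List.slice (PySem.List.slice cs (some (i : Int)) (some (PySem.Chars.findFrom cs ['}'] (i : Int) + 1))) (some 1) (some (-1))) ++ " times")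
            :: pvExplainA cs fuel ((PySem.Chars.findFrom cs ['}'] (i : Int)).toNat + 1)
        else pvSingleA (cs.getD i ' ') :: pvExplainA cs fuel (i + 1)
      else pvSingleA (cs.getD i ' ') :: pvExplainA cs fuel (i + 1)
    else []

def explain_pattern (pattern : String) : List (String × String) :=
  pvExplainA pattern.toList pattern.toList.length 0

-- ===== PORT B =====

-- Source B's inner 'while stack: … if d == close: break' consumption: split the suffix at
-- the first occurrence of `close` (inclusive); none = no closer anywhere (buf pushed back)
def pvSplitClose (close : Char) : List Char → Option (List Char × List Char)
  | [] => none
  | d :: rest =>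
    if d = close then some ([d], rest)
    else match pvSplitClose close rest with
      | some (buf, rest') => some (d :: buf, rest')
      | none => none

theorem pvSplitClose_length (close : Char) : ∀ (s : List Char) (buf rest : List Char),
    pvSplitClose close s = some (buf, rest) → rest.length < s.length := by
  intro s
  induction s with
  | nil => intro _ _ h; simp [pvSplitClose] at h
  | cons d tl ih =>
    intro buf rest h
    simp only [pvSplitClose] at h
    split at h
    · simp at h; simp [← h.2]
    · split at h
      · rename_i buf' rest' heq
        simp at h
        have := ih buf' rest' heq
        simp [← h.2]; omega
      · simp at h

-- Source B's group consumption: pop characters maintaining paren depth until depth hits 0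
-- or the stack empties; returns (consumed, remaining)
def pvSpanGroup : List Char → Nat → List Char × List Char
  | [], _ => ([], [])
  | d :: rest, depth =>
    -- depth is updated from the popped character, then tested (Source B's loop condition)
    if (if d = '(' then depth + 1 else if d = ')' then depth - 1 else depth) = 0 then
      ([d], rest)
    else
      (d :: (pvSpanGroup rest (if d = '(' then depth + 1 else if d = ')' then depth - 1 else depth)).1,
       (pvSpanGroup rest (if d = '(' then depth + 1 else if d = ')' then depth - 1 else depth)).2)

theorem pvSpanGroup_length : ∀ (s : List Char) (depth : Nat),
    (pvSpanGroup s depth).2.length ≤ s.length := by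
  intro s
  induction s with
  | nil => intro _; simp [pvSpanGroup]
  | cons d tl ih =>
    intro depth
    by_cases h : (if d = '(' then depth + 1 else if d = ')' then depth - 1 else depth) = 0
    · simp [pvSpanGroup, h]
    · have := ih (if d = '(' then depth + 1 else if d = ')' then depth - 1 else depth)
      simp only [pvSpanGroup, if_neg h]
      simp; omega

-- pass 1 (Source B's _scan): cut the pattern into raw tokens by consuming the stack
def pvScanB (s : List Char) : List (List Char) :=
  match s with
  | [] => []
  | c :: rest =>
    if c = '\\' then
      match rest with
      | d :: rest' =>
        if pvEXPL.contains (String.ofList [c, d]) then [c, d] :: pvScanB rest'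
        else [c] :: pvScanB (d :: rest')
      | [] => [c] :: pvScanB []
    else if c = '[' ∨ c = '{' then
      let close := if c = '[' then ']' else '}'
      match h : pvSplitClose close rest with
      | some (buf, rest') => (c :: buf) :: pvScanB rest'
      | none => [c] :: pvScanB rest
    else if c = '(' then
      (c :: (pvSpanGroup rest 1).1) :: pvScanB (pvSpanGroup rest 1).2
    else [c] :: pvScanB rest
termination_by s.length
decreasing_by
  all_goals try (simp; done)
  · have := pvSplitClose_length (if c = '[' then ']' else '}') rest _ _ h; simp; omega
  · have := pvSpanGroup_length rest 1; simp; omega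

-- pass 2 (Source B's _explain): explain one raw token from its own shape
def pvExplainTok (tok : List Char) : String :=
  match tok with
  | ['\\', _] => pvEXPL.getD (String.ofList tok) ""
  | '[' :: '^' :: _ => "Any character NOT in: " ++ String.ofList (PySem.List.slice tok (some 2) (some (-1)))
  | '[' :: _ :: _ => "Any character in: " ++ String.ofList (PySem.List.slice tok (some 1) (some (-1)))
  | '(' :: '?' :: ':' :: _ => "Non-capturing group: " ++ String.ofList (PySem.List.slice tok (some 3) (some (-1)))
  | '(' :: '?' :: '=' :: _ => "Lookahead (must be followed by): " ++ String.ofList (PySem.List.slice tok (some 3) (some (-1)))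
  | '(' :: '?' :: '!' :: _ => "Negative lookahead (must NOT be followed by): " ++ String.ofList (PySem.List.slice tok (some 3) (some (-1)))
  | '(' :: _ => "Capturing group: " ++ String.ofList (PySem.List.slice tok (some 1) (some (-1)))
  | '{' :: _ :: _ => "Repeat " ++ String.ofList (PySem.List.slice tok (some 1) (some (-1))) ++ " times"
  | _ =>
    if pvEXPL.contains (String.ofList tok) then pvEXPL.getD (String.ofList tok) ""
    else if PySem.Chars.strIsalnum tok then "Literal character: " ++ String.ofList tok
    else "Literal: " ++ String.ofList tok

def explain_pattern_alt (pattern : String) : List (String × String) :=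
  (pvScanB pattern.toList).map (fun t => (String.ofList t, pvExplainTok t))

-- ===== PRECONDITION & SPEC =====
def Spec_explain_pattern (pattern : String) (out : List (String × String)) : Prop := out = explain_pattern_alt pattern
instance (pattern : String) (out : List (String × String)) : Decidable (Spec_explain_pattern pattern out) := by unfold Spec_explain_pattern; infer_instance

-- ===== CLAIM (what is proved, stated in full; the proofs are below) =====
def Claim_equal_explain_pattern : Prop := ∀ (pattern : String), Dom_explain_pattern pattern → Spec_explain_pattern pattern (explain_pattern pattern)

-- ===== LEMMAS AND PROOFS =====

-- bounds for A's depth loop: it never moves left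
theorem pvGroupEnd_le (cs : List Char) (depth e : Nat) : e ≤ pvGroupEnd cs depth e := by
  unfold pvGroupEnd
  split
  · rename_i h
    have ih := pvGroupEnd_le cs
      (if cs.getD e ' ' = '(' then depth + 1
       else if cs.getD e ' ' = ')' then depth - 1 else depth) (e + 1)
    omega
  · omega
termination_by cs.length - e
decreasing_by omega

-- a slice with in-range nonneg bounds starts with the character at its left bound
theorem pv_slice_cons (cs : List Char) (i j : Nat) (h1 : i < cs.length) (h2 : i < j) :
    PySem.List.slice cs (some (i : Int)) (some (j : Int))
      = cs[i] :: (cs.drop (i + 1)).take (j - i - 1) := by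
  rw [PySem.List.slice_natCast, List.drop_eq_getElem_cons h1]
  have : j - i = (j - i - 1) + 1 := by omega
  rw [this, List.take_succ_cons]
  simp

-- the two-character escape slice
theorem pv_slice_two (cs : List Char) (i : Nat) (h : i + 1 < cs.length) :
    PySem.List.slice cs (some (i : Int)) (some ((i : Int) + 2)) = [cs[i], cs[i + 1]] := by
  have h2 : ((i : Int) + 2) = ((i + 2 : Nat) : Int) := by push_cast; ring
  rw [h2, pv_slice_cons cs i (i + 2) (by omega) (by omega),
    List.drop_eq_getElem_cons h]
  have : i + 2 - i - 1 = 1 := by omega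
  rw [this, List.take_succ_cons, List.take_zero]

-- what Chars.findFrom gives when it does not return -1: the FIRST index ≥ i holding c
theorem pv_find_spec (cs : List Char) (c : Char) (i : Nat) (hi : i ≤ cs.length)
    (h : PySem.Chars.findFrom cs [c] (i : Int) ≠ -1) :
    ∃ e : Nat, PySem.Chars.findFrom cs [c] (i : Int) = (e : Int) ∧ i ≤ e ∧ e < cs.length ∧
      cs.getD e ' ' = c ∧ ∀ i', i ≤ i' → i' < e → cs.getD i' ' ' ≠ c := by
  obtain ⟨h1, h2, h3⟩ := PySem.Chars.findFrom_natCast_spec cs [c] i hi h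
  set e := (PySem.Chars.findFrom cs [c] (i : Int)).toNat with he
  obtain ⟨t, ht⟩ := h2
  have hlt : e < cs.length := by
    have := congrArg List.length ht
    simp only [List.length_drop, List.length_append, List.length_cons] at this
    omega
  refine ⟨e, by omega, by omega, hlt, ?_, ?_⟩
  · have hd := List.drop_eq_getElem_cons hlt
    rw [hd] at ht
    simp only [List.cons_append, List.cons.injEq] at ht
    rw [List.getD_eq_getElem cs ' ' hlt]
    exact ht.1.symm
  · intro i' hii' hi'e hc
    have hi'lt : i' < cs.length := by omega
    refine h3 i' hii' (by omega) ?_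
    rw [List.getD_eq_getElem cs ' ' hi'lt] at hc
    rw [List.drop_eq_getElem_cons hi'lt, hc]
    exact ⟨_, rfl⟩

-- findFrom = -1 means the closer is nowhere in the suffix
theorem pv_find_none (cs : List Char) (c : Char) (i : Nat) (hi : i ≤ cs.length)
    (h : PySem.Chars.findFrom cs [c] (i : Int) = -1) : c ∉ cs.drop i := by
  have hinf := (PySem.Chars.findFrom_natCast_eq_neg_one_iff cs [c] i hi).mp h
  intro hm
  apply hinf
  obtain ⟨l1, l2, hsplit⟩ := List.append_of_mem hm
  exact ⟨l1, l2, by rw [hsplit]; simp⟩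

-- pvSplitClose finds nothing exactly when the closer is absent
theorem pv_split_none (c : Char) : ∀ s : List Char, c ∉ s → pvSplitClose c s = none := by
  intro s
  induction s with
  | nil => intro _; rfl
  | cons d tl ih =>
    intro h
    simp only [List.mem_cons, not_or] at h
    have hd : ¬ d = c := fun hh => h.1 hh.symm
    simp only [pvSplitClose, if_neg hd, ih h.2]

-- pvSplitClose at the first occurrence
theorem pv_split_some (c : Char) : ∀ (s : List Char) (j : Nat), j < s.length →
    s.getD j ' ' = c → (∀ i, i < j → s.getD i ' ' ≠ c) →
    pvSplitClose c s = some (s.take (j + 1), s.drop (j + 1)) := by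
  intro s
  induction s with
  | nil => intro j hj; simp at hj
  | cons d tl ih =>
    intro j hj hget hmin
    cases j with
    | zero =>
      simp only [List.getD_cons_zero] at hget
      simp [pvSplitClose, hget]
    | succ j' =>
      have hd : d ≠ c := by
        have := hmin 0 (by omega)
        simpa using this
      simp only [pvSplitClose, if_neg hd]
      rw [ih j' (by simpa using hj) (by simpa using hget)
        (fun i hi => by simpa using hmin (i + 1) (by omega))]
      simp

-- B's group consumption agrees with A's index walk pvGroupEnd
theorem pv_span_eq (cs : List Char) : ∀ k e depth, cs.length - e = k → 0 < depth →
    pvSpanGroup (cs.drop e) depth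
      = ((cs.drop e).take (pvGroupEnd cs depth e - e), cs.drop (pvGroupEnd cs depth e)) := by
  intro k
  induction k with
  | zero =>
    intro e depth hk hd
    have hle : cs.length ≤ e := by omega
    have hnil : cs.drop e = [] := List.drop_eq_nil_of_le hle
    have hg : pvGroupEnd cs depth e = e := by
      unfold pvGroupEnd; rw [dif_neg (by omega)]
    rw [hnil, hg, hnil]
    simp [pvSpanGroup]
  | succ k ih =>
    intro e depth hk hd
    have he : e < cs.length := by omega
    have hdrop : cs.drop e = cs[e] :: cs.drop (e + 1) := List.drop_eq_getElem_cons he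
    have hget : cs.getD e ' ' = cs[e] := List.getD_eq_getElem cs ' ' he
    set d' := if cs[e] = '(' then depth + 1 else if cs[e] = ')' then depth - 1 else depth with hd'
    have hg : pvGroupEnd cs depth e = pvGroupEnd cs d' (e + 1) := by
      conv_lhs => unfold pvGroupEnd
      rw [dif_pos ⟨he, hd⟩, hget]
    by_cases h0 : d' = 0
    · have hg2 : pvGroupEnd cs d' (e + 1) = e + 1 := by
        unfold pvGroupEnd; rw [dif_neg (by omega)]
      rw [hdrop]
      simp only [pvSpanGroup, ← hd', if_pos h0]
      rw [hg, hg2]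
      have h1 : e + 1 - e = 1 := by omega
      rw [h1, List.take_succ_cons, List.take_zero]
    · have hb := pvGroupEnd_le cs d' (e + 1)
      have ihe := ih (e + 1) d' (by omega) (by omega)
      rw [hdrop]
      simp only [pvSpanGroup, ← hd', if_neg h0]
      rw [ihe, hg]
      have : pvGroupEnd cs d' (e + 1) - e = (pvGroupEnd cs d' (e + 1) - (e + 1)) + 1 := by omega
      rw [this, List.take_succ_cons]

-- B's token mapper on a single character agrees with A's trailing block
theorem pv_single_eq (c : Char) (hc : c ≠ '(') :
    (String.ofList [c], pvExplainTok [c]) = pvSingleA c := by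
  have : pvExplainTok [c] =
      (if pvEXPL.contains (String.ofList [c]) then pvEXPL.getD (String.ofList [c]) ""
       else if PySem.Chars.strIsalnum [c] then "Literal character: " ++ String.ofList [c]
       else "Literal: " ++ String.ofList [c]) := by
    unfold pvExplainTok
    split
    · rename_i heq; simp at heq
    · rename_i heq; simp at heq
    · rename_i heq; simp at heq
    · rename_i heq; simp at heq
    · rename_i heq; simp at heq
    · rename_i heq; simp at heq
    · rename_i heq
      injection heq with h1 h2
      exact absurd h1 hc
    · rename_i heq; simp at heq
    · rfl
  rw [pvSingleA, this]
  split_ifs <;> rfl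

-- B's token mapper on a class token agrees with A's inline branch
theorem pvExplainTok_class (body : List Char) (hb : body ≠ []) :
    pvExplainTok ('[' :: body) =
      if PySem.Chars.startswith ('[' :: body) ['[', '^'] then
        "Any character NOT in: " ++ String.ofList (PySem.List.slice ('[' :: body) (some 2) (some (-1)))
      else
        "Any character in: " ++ String.ofList (PySem.List.slice ('[' :: body) (some 1) (some (-1))) := by
  cases body with
  | nil => exact absurd rfl hb
  | cons b bs =>
    by_cases hb2 : b = '^'
    · subst hb2
      have hsw : PySem.Chars.startswith ('[' :: '^' :: bs) ['[', '^'] = true := by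
        simp [PySem.Chars.startswith]
      rw [if_pos hsw]
      rfl
    · have hsw : ¬ PySem.Chars.startswith ('[' :: b :: bs) ['[', '^'] = true := by
        intro h
        simp only [PySem.Chars.startswith] at h
        obtain ⟨t, ht⟩ := List.isPrefixOf_iff_prefix.mp h
        simp only [List.cons_append, List.nil_append] at ht
        injection ht with _ h2
        injection h2 with h3 _
        exact hb2 h3.symm
      rw [if_neg hsw]
      unfold pvExplainTok
      split
      case h_1 heq => simp at heq
      case h_2 heq =>
        injection heq with h1 h2
        injection h2 with h3 h4
        exact absurd h3 hb2
      case h_3 => rfl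
      case h_4 heq => simp at heq
      case h_5 heq => simp at heq
      case h_6 heq => simp at heq
      case h_7 heq => simp at heq
      case h_8 heq => simp at heq
      case h_9 =>
        exact absurd rfl
          (‹∀ (head : Char) (tail : List Char), '[' :: b :: bs = '[' :: head :: tail → False› b bs)

-- B's token mapper on a group token agrees with A's inline branch
theorem pvExplainTok_group (body : List Char) :
    pvExplainTok ('(' :: body) =
      (if PySem.Chars.startswith ('(' :: body) ['(', '?', ':'] then
         "Non-capturing group: " ++ String.ofList (PySem.List.slice ('(' :: body) (some 3) (some (-1)))
       else if PySem.Chars.startswith ('(' :: body) ['(', '?', '='] then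
         "Lookahead (must be followed by): " ++ String.ofList (PySem.List.slice ('(' :: body) (some 3) (some (-1)))
       else if PySem.Chars.startswith ('(' :: body) ['(', '?', '!'] then
         "Negative lookahead (must NOT be followed by): " ++ String.ofList (PySem.List.slice ('(' :: body) (some 3) (some (-1)))
       else
         "Capturing group: " ++ String.ofList (PySem.List.slice ('(' :: body) (some 1) (some (-1)))) := by
  unfold pvExplainTok
  split
  case h_1 heq => simp at heq
  case h_2 heq => simp at heq
  case h_3 heq => simp at heq
  case h_4 heq =>
    injection heq with h1 h2
    subst h2
    rw [if_pos (by simp [PySem.Chars.startswith, List.isPrefixOf])]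
  case h_5 heq =>
    injection heq with h1 h2
    subst h2
    rw [if_neg (by simp [PySem.Chars.startswith, List.isPrefixOf]),
      if_pos (by simp [PySem.Chars.startswith, List.isPrefixOf])]
  case h_6 heq =>
    injection heq with h1 h2
    subst h2
    rw [if_neg (by simp [PySem.Chars.startswith, List.isPrefixOf]),
      if_neg (by simp [PySem.Chars.startswith, List.isPrefixOf]),
      if_pos (by simp [PySem.Chars.startswith, List.isPrefixOf])]
  case h_7 heq =>
    injection heq with h1 h2
    subst h2
    have c1 : ¬ PySem.Chars.startswith ('(' :: body) ['(', '?', ':'] = true := by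
      intro h
      simp only [PySem.Chars.startswith] at h
      obtain ⟨t, ht⟩ := List.isPrefixOf_iff_prefix.mp h
      simp only [List.cons_append, List.nil_append] at ht
      injection ht with _ h2
      exact ‹∀ (tail : List Char), body = '?' :: ':' :: tail → False› t h2.symm
    have c2 : ¬ PySem.Chars.startswith ('(' :: body) ['(', '?', '='] = true := by
      intro h
      simp only [PySem.Chars.startswith] at h
      obtain ⟨t, ht⟩ := List.isPrefixOf_iff_prefix.mp h
      simp only [List.cons_append, List.nil_append] at ht
      injection ht with _ h2
      exact ‹∀ (tail : List Char), body = '?' :: '=' :: tail → False› t h2.symm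
    have c3 : ¬ PySem.Chars.startswith ('(' :: body) ['(', '?', '!'] = true := by
      intro h
      simp only [PySem.Chars.startswith] at h
      obtain ⟨t, ht⟩ := List.isPrefixOf_iff_prefix.mp h
      simp only [List.cons_append, List.nil_append] at ht
      injection ht with _ h2
      exact ‹∀ (tail : List Char), body = '?' :: '!' :: tail → False› t h2.symm
    rw [if_neg c1, if_neg c2, if_neg c3]
  case h_8 heq => simp at heq
  case h_9 =>
    exact absurd rfl (‹∀ (tail : List Char), '(' :: body = '(' :: tail → False› body)

-- B's token mapper on a quantifier token agrees with A's inline branch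
theorem pvExplainTok_quant (body : List Char) (hb : body ≠ []) :
    pvExplainTok ('{' :: body) =
      "Repeat " ++ String.ofList (PySem.List.slice ('{' :: body) (some 1) (some (-1))) ++ " times" := by
  cases body with
  | nil => exact absurd rfl hb
  | cons b bs => rfl

-- one-step unfoldings of B's scanner
theorem pvScanB_esc_hit (d : Char) (r : List Char)
    (h : pvEXPL.contains (String.ofList ['\\', d]) = true) :
    pvScanB ('\\' :: d :: r) = ['\\', d] :: pvScanB r := by
  rw [pvScanB.eq_def]; simp [h]

theorem pvScanB_esc_miss (d : Char) (r : List Char)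
    (h : ¬ pvEXPL.contains (String.ofList ['\\', d]) = true) :
    pvScanB ('\\' :: d :: r) = ['\\'] :: pvScanB (d :: r) := by
  rw [pvScanB.eq_def]; simp [h]

theorem pvScanB_nil : pvScanB [] = [] := by
  rw [pvScanB.eq_def]

theorem pvScanB_esc_end : pvScanB ['\\'] = ['\\'] :: pvScanB [] := by
  rw [pvScanB.eq_def]; simp

theorem pvScanB_class_some (r buf rest' : List Char) (h : pvSplitClose ']' r = some (buf, rest')) :
    pvScanB ('[' :: r) = ('[' :: buf) :: pvScanB rest' := by
  rw [pvScanB.eq_def]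
  simp only [reduceIte, reduceCtorEq, Char.reduceEq, or_true, true_or, if_false, if_true]
  split
  · rename_i buf2 rest2 heq
    simp only [Char.reduceEq, reduceIte] at heq
    rw [h] at heq
    injection heq with heq2
    injection heq2 with h1 h2
    rw [h1, h2]
  · rename_i heq
    simp only [Char.reduceEq, reduceIte] at heq
    rw [h] at heq
    cases heq

theorem pvScanB_class_none (r : List Char) (h : pvSplitClose ']' r = none) :
    pvScanB ('[' :: r) = ['['] :: pvScanB r := by
  rw [pvScanB.eq_def]
  simp only [reduceIte, reduceCtorEq, Char.reduceEq, or_true, true_or, if_false, if_true]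
  split
  · rename_i buf2 rest2 heq
    simp only [Char.reduceEq, reduceIte] at heq
    rw [h] at heq
    cases heq
  · rfl

theorem pvScanB_quant_some (r buf rest' : List Char) (h : pvSplitClose '}' r = some (buf, rest')) :
    pvScanB ('{' :: r) = ('{' :: buf) :: pvScanB rest' := by
  rw [pvScanB.eq_def]
  simp only [reduceIte, reduceCtorEq, Char.reduceEq, or_true, true_or, if_false, if_true]
  split
  · rename_i buf2 rest2 heq
    simp only [Char.reduceEq, reduceIte] at heq
    rw [h] at heq
    injection heq with heq2
    injection heq2 with h1 h2
    rw [h1, h2]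
  · rename_i heq
    simp only [Char.reduceEq, reduceIte] at heq
    rw [h] at heq
    cases heq

theorem pvScanB_quant_none (r : List Char) (h : pvSplitClose '}' r = none) :
    pvScanB ('{' :: r) = ['{'] :: pvScanB r := by
  rw [pvScanB.eq_def]
  simp only [reduceIte, reduceCtorEq, Char.reduceEq, or_true, true_or, if_false, if_true]
  split
  · rename_i buf2 rest2 heq
    simp only [Char.reduceEq, reduceIte] at heq
    rw [h] at heq
    cases heq
  · rfl

theorem pvScanB_group (r : List Char) :
    pvScanB ('(' :: r) = ('(' :: (pvSpanGroup r 1).1) :: pvScanB (pvSpanGroup r 1).2 := by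
  rw [pvScanB.eq_def]; simp

theorem pvScanB_single (c : Char) (r : List Char)
    (h1 : c ≠ '\\') (h2 : c ≠ '[') (h3 : c ≠ '{') (h4 : c ≠ '(') :
    pvScanB (c :: r) = [c] :: pvScanB r := by
  rw [pvScanB.eq_def]; simp [h1, h2, h3, h4]

theorem pv_main (cs : List Char) : ∀ fuel i, cs.length ≤ i + fuel →
    pvExplainA cs fuel i = (pvScanB (cs.drop i)).map (fun t => (String.ofList t, pvExplainTok t)) := by
  intro fuel
  induction fuel with
  | zero =>
    intro i hle
    rw [List.drop_eq_nil_of_le (by omega), pvScanB_nil]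
    rfl
  | succ fuel ih =>
    intro i hle
    by_cases hi : i < cs.length
    case neg =>
      rw [List.drop_eq_nil_of_le (by omega), pvScanB_nil]
      simp [pvExplainA, hi]
    case pos =>
    have hget : cs.getD i ' ' = cs[i] := List.getD_eq_getElem cs ' ' hi
    have hdrop : cs.drop i = cs[i] :: cs.drop (i + 1) := List.drop_eq_getElem_cons hi
    rw [hdrop]
    simp only [pvExplainA, if_pos hi]
    by_cases hbs : cs.getD i ' ' = '\\' ∧ i + 1 < cs.length
    · -- backslash with a following character
      have hc : cs[i] = '\\' := by rw [← hget]; exact hbs.1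
      have hdrop2 : cs.drop (i + 1) = cs[i + 1] :: cs.drop (i + 2) := List.drop_eq_getElem_cons hbs.2
      have hsl : PySem.List.slice cs (some (i : Int)) (some ((i : Int) + 2)) = [cs[i], cs[i + 1]] :=
        pv_slice_two cs i hbs.2
      rw [if_pos hbs, hsl, hc]
      by_cases hk : pvEXPL.contains (String.ofList ['\\', cs[i + 1]]) = true
      · rw [if_pos hk, hdrop2, pvScanB_esc_hit _ _ hk, List.map_cons, ih (i + 2) (by omega)]
        rfl
      · rw [if_neg hk, hdrop2, pvScanB_esc_miss _ _ hk, ← hdrop2, List.map_cons,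
          ih (i + 1) (by omega), hbs.1]
        try rw [← pv_single_eq '\\' (by decide)]
    · rw [if_neg hbs]
      by_cases hcl : cs.getD i ' ' = '['
      · -- character class
        have hc : cs[i] = '[' := by rw [← hget]; exact hcl
        rw [if_pos hcl, hc]
        by_cases hf : PySem.Chars.findFrom cs [']'] (i : Int) ≠ -1
        · rw [if_pos hf]
          obtain ⟨e, he, hie, helt, hec, hmin⟩ := pv_find_spec cs ']' i (by omega) hf
          have hine : i ≠ e := by
            intro h; rw [← h, hcl] at hec; exact absurd hec (by decide)
          set j := e - (i + 1) with hj
          have hjlen : j < (cs.drop (i + 1)).length := by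
            rw [List.length_drop]; omega
          have hgd : (cs.drop (i + 1)).getD j ' ' = ']' := by
            rw [List.getD_eq_getElem _ _ hjlen, List.getElem_drop]
            rw [List.getD_eq_getElem cs ' ' helt] at hec
            have : i + 1 + j = e := by omega
            simp_rw [this]
            exact hec
          have hminD : ∀ i0, i0 < j → (cs.drop (i + 1)).getD i0 ' ' ≠ ']' := by
            intro i0 hi0
            have hl : i + 1 + i0 < cs.length := by omega
            rw [List.getD_eq_getElem _ ' ' (by rw [List.length_drop]; omega), List.getElem_drop]
            have := hmin (i + 1 + i0) (by omega) (by omega)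
            rw [List.getD_eq_getElem cs ' ' hl] at this
            exact this
          have hsplit := pv_split_some ']' (cs.drop (i + 1)) j hjlen hgd hminD
          have hrest : (cs.drop (i + 1)).drop (j + 1) = cs.drop (e + 1) := by
            rw [List.drop_drop]
            congr 1
            omega
          have hca : PySem.Chars.findFrom cs [']'] (i : Int) + 1 = ((e + 1 : Nat) : Int) := by
            rw [he]; push_cast; ring
          have htok : PySem.List.slice cs (some (i : Int)) (some (((e + 1 : Nat)) : Int))
              = '[' :: (cs.drop (i + 1)).take (j + 1) := by
            rw [pv_slice_cons cs i (e + 1) hi (by omega), hc]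
            congr 2
            omega
          have htn : (PySem.Chars.findFrom cs [']'] (i : Int)).toNat + 1 = e + 1 := by
            rw [he]; simp
          rw [hca, htok, htn, pvScanB_class_some _ _ _ hsplit, List.map_cons, hrest,
            ih (e + 1) (by omega)]
          have hbne : (cs.drop (i + 1)).take (j + 1) ≠ [] := by
            have : ((cs.drop (i + 1)).take (j + 1)).length = j + 1 := by
              rw [List.length_take, List.length_drop]; omega
            intro hnil
            rw [hnil] at this
            simp at this
          rw [pvExplainTok_class _ hbne]
        · rw [if_neg hf]
          push_neg at hf
          have hnm : ']' ∉ cs.drop (i + 1) := by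
            have := pv_find_none cs ']' i (by omega) hf
            intro hm
            exact this (by rw [hdrop]; exact List.mem_cons_of_mem _ hm)
          rw [pvScanB_class_none _ (pv_split_none ']' _ hnm), List.map_cons, ih (i + 1) (by omega),
            hcl]
          try rw [← pv_single_eq '[' (by decide)]
      · rw [if_neg hcl]
        by_cases hpar : cs.getD i ' ' = '('
        · -- group
          have hc : cs[i] = '(' := by rw [← hget]; exact hpar
          rw [if_pos hpar, hc]
          have hg1 := pvGroupEnd_le cs 1 (i + 1)
          have hspan := pv_span_eq cs (cs.length - (i + 1)) (i + 1) 1 rfl (by omega)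
          have htok : PySem.List.slice cs (some (i : Int)) (some ((pvGroupEnd cs 1 (i + 1) : Nat) : Int))
              = '(' :: (cs.drop (i + 1)).take (pvGroupEnd cs 1 (i + 1) - (i + 1)) := by
            rw [pv_slice_cons cs i (pvGroupEnd cs 1 (i + 1)) hi (by omega), hc]
            congr 2
          rw [htok, pvScanB_group, hspan, List.map_cons, ih (pvGroupEnd cs 1 (i + 1)) (by omega)]
          try rw [pvExplainTok_group]
        · rw [if_neg hpar]
          by_cases hqu : cs.getD i ' ' = '{'
          · -- quantifier
            have hc : cs[i] = '{' := by rw [← hget]; exact hqu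
            rw [if_pos hqu, hc]
            by_cases hf : PySem.Chars.findFrom cs ['}'] (i : Int) ≠ -1
            · rw [if_pos hf]
              obtain ⟨e, he, hie, helt, hec, hmin⟩ := pv_find_spec cs '}' i (by omega) hf
              have hine : i ≠ e := by
                intro h; rw [← h, hqu] at hec; exact absurd hec (by decide)
              set j := e - (i + 1) with hj
              have hjlen : j < (cs.drop (i + 1)).length := by
                rw [List.length_drop]; omega
              have hgd : (cs.drop (i + 1)).getD j ' ' = '}' := by
                rw [List.getD_eq_getElem _ _ hjlen, List.getElem_drop]
                rw [List.getD_eq_getElem cs ' ' helt] at hec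
                have : i + 1 + j = e := by omega
                simp_rw [this]
                exact hec
              have hminD : ∀ i0, i0 < j → (cs.drop (i + 1)).getD i0 ' ' ≠ '}' := by
                intro i0 hi0
                have hl : i + 1 + i0 < cs.length := by omega
                rw [List.getD_eq_getElem _ ' ' (by rw [List.length_drop]; omega), List.getElem_drop]
                have := hmin (i + 1 + i0) (by omega) (by omega)
                rw [List.getD_eq_getElem cs ' ' hl] at this
                exact this
              have hsplit := pv_split_some '}' (cs.drop (i + 1)) j hjlen hgd hminD
              have hrest : (cs.drop (i + 1)).drop (j + 1) = cs.drop (e + 1) := by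
                rw [List.drop_drop]
                congr 1
                omega
              have hca : PySem.Chars.findFrom cs ['}'] (i : Int) + 1 = ((e + 1 : Nat) : Int) := by
                rw [he]; push_cast; ring
              have htok : PySem.List.slice cs (some (i : Int)) (some (((e + 1 : Nat)) : Int))
                  = '{' :: (cs.drop (i + 1)).take (j + 1) := by
                rw [pv_slice_cons cs i (e + 1) hi (by omega), hc]
                congr 2
                omega
              have htn : (PySem.Chars.findFrom cs ['}'] (i : Int)).toNat + 1 = e + 1 := by
                rw [he]; simp
              rw [hca, htok, htn, pvScanB_quant_some _ _ _ hsplit, List.map_cons, hrest,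
                ih (e + 1) (by omega)]
              have hbne : (cs.drop (i + 1)).take (j + 1) ≠ [] := by
                have : ((cs.drop (i + 1)).take (j + 1)).length = j + 1 := by
                  rw [List.length_take, List.length_drop]; omega
                intro hnil
                rw [hnil] at this
                simp at this
              rw [pvExplainTok_quant _ hbne]
            · rw [if_neg hf]
              push_neg at hf
              have hnm : '}' ∉ cs.drop (i + 1) := by
                have := pv_find_none cs '}' i (by omega) hf
                intro hm
                exact this (by rw [hdrop]; exact List.mem_cons_of_mem _ hm)
              rw [pvScanB_quant_none _ (pv_split_none '}' _ hnm), List.map_cons,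
                ih (i + 1) (by omega), hqu]
              try rw [← pv_single_eq '{' (by decide)]
          · -- plain single character
            rw [if_neg hqu]
            by_cases hbs2 : cs[i] = '\\'
            · -- backslash at the last position, or escape sequence not in the table
              have hlast : ¬ i + 1 < cs.length := fun h => hbs ⟨by rw [hget]; exact hbs2, h⟩
              have hdz : cs.drop (i + 1) = [] := List.drop_eq_nil_of_le (by omega)
              rw [hbs2, hdz, pvScanB_esc_end, List.map_cons, ih (i + 1) (by omega), hdz,
                hget, hbs2]
              try rw [← pv_single_eq '\\' (by decide)]
            · have hne1 : cs[i] ≠ '[' := by rw [← hget]; exact hcl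
              have hne2 : cs[i] ≠ '(' := by rw [← hget]; exact hpar
              have hne3 : cs[i] ≠ '{' := by rw [← hget]; exact hqu
              rw [pvScanB_single _ _ hbs2 hne1 hne3 hne2, List.map_cons, ih (i + 1) (by omega),
                hget]
              try rw [← pv_single_eq (cs[i]) hne2]

-- ===== VERDICT (by name: the statement is the Claim_ definition above) =====
theorem explain_pattern_spec : Claim_equal_explain_pattern := by
  intro pattern _
  unfold Spec_explain_pattern explain_pattern explain_pattern_alt
  rw [pv_main pattern.toList pattern.toList.length 0 (by omega)]
  simp
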